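-- pv_equiv track=rewrite | github.com/sharmasatyam9921-glitch/Viper | recon/web_crawler.py | _classify_form
-- ===== SOURCE A (Python) =====
-- from typing import Dict, List, Optional, Set, Tuple
--
-- def _classify_form(form: Dict) -> str:
--     """Classify a form as login, upload, search, or generic."""
--     input_types = {i.get("type", "").lower() for i in form["inputs"]}
--     input_names = {i.get("name", "").lower() for i in form["inputs"]}
--
--     if "password" in input_types:
--         return "login"
--     if "file" in input_types:
--         return "upload"
--
--     search_indicators = {"search", "query", "q", "keyword", "s", "term"}
--     if input_names & search_indicators:
--         return "search"
--
--     login_indicators = {"username", "user", "email", "login", "passwd", "pass"}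
--     if input_names & login_indicators:
--         return "login"
--
--     return "generic"
-- ===== SOURCE B (Python) =====
-- def _classify_form(form):
--     """Classify a form by ranking: each input gets a priority rank (0=password-type,
--     1=file-type, 2=search-name, 3=login-name, 4=neutral); the smallest rank over all
--     inputs indexes into a label table. Correct because A's cascade of checks is exactly
--     'the highest-priority indicator present anywhere wins'."""
--     labels = ("login", "upload", "search", "login", "generic")
--     best = 4
--     for i in form["inputs"]:
--         t = i.get("type", "").lower()
--         n = i.get("name", "").lower()
--         tr = 0 if t == "password" else 1 if t == "file" else 4
--         nr = 2 if n in ("search", "query", "q", "keyword", "s", "term") else \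
--              3 if n in ("username", "user", "email", "login", "passwd", "pass") else 4
--         best = min(best, tr, nr)
--     return labels[best]
-- ===== Notes on version B (the rewrite author's own statement) =====
-- stated objective: alternative
-- what changed: Replaces the set-building and cascaded membership/intersection tests with a ranking scheme: each input is mapped to a numeric priority rank, a single pass keeps the minimum rank, and the answer is a table lookup labels[min_rank] instead of an if-chain.
import Mathlib
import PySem

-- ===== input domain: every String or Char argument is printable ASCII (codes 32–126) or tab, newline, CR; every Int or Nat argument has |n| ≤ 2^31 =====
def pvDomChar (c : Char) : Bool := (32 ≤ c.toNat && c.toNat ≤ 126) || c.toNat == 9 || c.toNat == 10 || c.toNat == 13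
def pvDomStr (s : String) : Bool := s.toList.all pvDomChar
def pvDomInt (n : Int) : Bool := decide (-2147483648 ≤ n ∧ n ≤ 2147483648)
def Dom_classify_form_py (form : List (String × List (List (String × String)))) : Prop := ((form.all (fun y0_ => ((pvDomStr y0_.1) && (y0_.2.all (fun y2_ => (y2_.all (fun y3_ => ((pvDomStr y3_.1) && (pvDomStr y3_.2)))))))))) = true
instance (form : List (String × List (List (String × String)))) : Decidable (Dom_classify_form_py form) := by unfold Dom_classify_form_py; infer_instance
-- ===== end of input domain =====

-- B replaces the set-building + cascaded membership tests with a ranking scheme: each input maps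
-- to a numeric priority rank, one pass keeps the minimum, and labels[min_rank] gives the answer
-- (alternative decomposition, same cost).

-- ===== PORT A =====
-- A: build the set of lowered types and the set of lowered names, then test membership / intersection.
def classify_form_py (form : List (String × List (List (String × String)))) : String :=
  let inputs := (PySem.Dict.mk form).getD "inputs" []
  let input_types : PySem.Set String :=
    PySem.Set.ofList (inputs.map (fun i => PySem.Str.lower ((PySem.Dict.mk i).getD "type" "")))
  let input_names : PySem.Set String :=
    PySem.Set.ofList (inputs.map (fun i => PySem.Str.lower ((PySem.Dict.mk i).getD "name" "")))
  if input_types.contains "password" then "login"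
  else if input_types.contains "file" then "upload"
  else
    let search_indicators : PySem.Set String :=
      PySem.Set.ofList ["search", "query", "q", "keyword", "s", "term"]
    if PySem.Set.inter input_names search_indicators ≠ [] then "search"
    else
      let login_indicators : PySem.Set String :=
        PySem.Set.ofList ["username", "user", "email", "login", "passwd", "pass"]
      if PySem.Set.inter input_names login_indicators ≠ [] then "login"
      else "generic"

-- ===== PORT B =====
-- B: each input gets a rank (0 password-type, 1 file-type, 2 search-name, 3 login-name, 4 neutral);
-- one pass keeps the minimum rank; the answer is labels[best].  best ≤ 4 always (it starts at 4 and
-- only decreases), so the Python tuple indexing labels[best] never raises and List.getD is exact.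
def classify_form_py_alt (form : List (String × List (List (String × String)))) : String :=
  let labels : List String := ["login", "upload", "search", "login", "generic"]
  let best := ((PySem.Dict.mk form).getD "inputs" []).foldl
    (fun (best : Nat) i =>
      let t := PySem.Str.lower ((PySem.Dict.mk i).getD "type" "")
      let n := PySem.Str.lower ((PySem.Dict.mk i).getD "name" "")
      let tr : Nat := if t == "password" then 0 else if t == "file" then 1 else 4
      let nr : Nat :=
        if ["search", "query", "q", "keyword", "s", "term"].contains n then 2
        else if ["username", "user", "email", "login", "passwd", "pass"].contains n then 3
        else 4
      Nat.min (Nat.min best tr) nr)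
    4
  labels.getD best "generic"

-- ===== PRECONDITION & SPEC =====
-- Pre_: form must carry the key "inputs" — A raises KeyError on form["inputs"] otherwise.
def Pre_classify_form_py (form : List (String × List (List (String × String)))) : Prop :=
  ((PySem.Dict.mk form).get? "inputs").isSome = true
instance (form : List (String × List (List (String × String)))) : Decidable (Pre_classify_form_py form) := by unfold Pre_classify_form_py; infer_instance
def pvWitness_classify_form_py : (List (String × List (List (String × String)))) :=
  [("inputs", [[("type", "text"), ("name", "q")]])]

def Spec_classify_form_py (form : List (String × List (List (String × String)))) (out : String) : Prop := out = classify_form_py_alt form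
instance (form : List (String × List (List (String × String)))) (out : String) : Decidable (Spec_classify_form_py form out) := by unfold Spec_classify_form_py; infer_instance

-- ===== CLAIM (what is proved, stated in full; the proofs are below) =====
def Claim_equal_classify_form_py : Prop := ∀ (form : List (String × List (List (String × String)))), Dom_classify_form_py form → Pre_classify_form_py form → Spec_classify_form_py form (classify_form_py form)

-- ===== LEMMAS AND PROOFS =====

-- the per-input rank B's fold minimises
def pvRank (i : List (String × String)) : Nat :=
  Nat.min
    (if PySem.Str.lower ((PySem.Dict.mk i).getD "type" "") == "password" then 0
     else if PySem.Str.lower ((PySem.Dict.mk i).getD "type" "") == "file" then 1 else 4)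
    (if ["search", "query", "q", "keyword", "s", "term"].contains
        (PySem.Str.lower ((PySem.Dict.mk i).getD "name" "")) then 2
     else if ["username", "user", "email", "login", "passwd", "pass"].contains
        (PySem.Str.lower ((PySem.Dict.mk i).getD "name" "")) then 3 else 4)

-- B's fold step is "min with the rank of the input"
lemma pv_fold_eq_rank (inputs : List (List (String × String))) (a : Nat) :
    inputs.foldl
      (fun (best : Nat) i =>
        let t := PySem.Str.lower ((PySem.Dict.mk i).getD "type" "")
        let n := PySem.Str.lower ((PySem.Dict.mk i).getD "name" "")
        let tr : Nat := if t == "password" then 0 else if t == "file" then 1 else 4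
        let nr : Nat :=
          if ["search", "query", "q", "keyword", "s", "term"].contains n then 2
          else if ["username", "user", "email", "login", "passwd", "pass"].contains n then 3
          else 4
        Nat.min (Nat.min best tr) nr) a
    = inputs.foldl (fun best i => Nat.min best (pvRank i)) a := by
  have hstep : ∀ (b : Nat) (i : List (String × String)),
      (let t := PySem.Str.lower ((PySem.Dict.mk i).getD "type" "")
       let n := PySem.Str.lower ((PySem.Dict.mk i).getD "name" "")
       let tr : Nat := if t == "password" then 0 else if t == "file" then 1 else 4
       let nr : Nat :=
         if ["search", "query", "q", "keyword", "s", "term"].contains n then 2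
         else if ["username", "user", "email", "login", "passwd", "pass"].contains n then 3
         else 4
       Nat.min (Nat.min b tr) nr) = Nat.min b (pvRank i) := by
    intro b i
    simp [pvRank, Nat.min_assoc]
  simp only [hstep]

-- the running minimum is ≤ k iff the seed is or some element's rank is
lemma pv_foldl_min_le (inputs : List (List (String × String))) (a k : Nat) :
    inputs.foldl (fun best i => Nat.min best (pvRank i)) a ≤ k
      ↔ a ≤ k ∨ ∃ i ∈ inputs, pvRank i ≤ k := by
  induction inputs generalizing a with
  | nil => simp
  | cons x xs ih =>
      simp only [List.foldl_cons, ih, min_le_iff, List.mem_cons]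
      constructor
      · rintro ((h | h) | ⟨i, hi, h⟩)
        · exact Or.inl h
        · exact Or.inr ⟨x, Or.inl rfl, h⟩
        · exact Or.inr ⟨i, Or.inr hi, h⟩
      · rintro (h | ⟨i, (rfl | hi), h⟩)
        · exact Or.inl (Or.inl h)
        · exact Or.inl (Or.inr h)
        · exact Or.inr ⟨i, hi, h⟩

-- "v in {f(i) for i in inputs}" is "some input has f i = v".
lemma pv_contains_ofList_map (inputs : List (List (String × String)))
    (f : List (String × String) → String) (v : String) :
    (PySem.Set.ofList (inputs.map f)).contains v = inputs.any (fun i => f i == v) := by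
  rw [Bool.eq_iff_iff]
  simp only [PySem.Set.contains, List.contains_iff_mem, PySem.Set.mem_ofList, List.mem_map,
    List.any_eq_true, beq_iff_eq]

-- "{f(i) for i in inputs} & S" is nonempty iff some input's f i lies in S.
lemma pv_inter_ne_nil (inputs : List (List (String × String)))
    (f : List (String × String) → String) (S : List String) :
    (PySem.Set.inter (PySem.Set.ofList (inputs.map f)) (PySem.Set.ofList S) ≠ [])
      ↔ inputs.any (fun i => S.contains (f i)) = true := by
  rw [← List.isEmpty_eq_false_iff, List.isEmpty_eq_false_iff_exists_mem]
  simp only [PySem.Set.mem_inter, PySem.Set.mem_ofList, List.mem_map, List.any_eq_true,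
    List.contains_iff_mem]
  constructor
  · rintro ⟨x, ⟨i, hi, rfl⟩, hS⟩; exact ⟨i, hi, hS⟩
  · rintro ⟨i, hi, hS⟩; exact ⟨f i, ⟨i, hi, rfl⟩, hS⟩

-- rank bounds ↔ the per-input indicator tests, cumulatively
lemma pv_rank_le_zero (i : List (String × String)) :
    pvRank i ≤ 0 ↔ (PySem.Str.lower ((PySem.Dict.mk i).getD "type" "") == "password") = true := by
  unfold pvRank; split_ifs with h1 h2 h3 h4 <;> simp_all

lemma pv_rank_le_one (i : List (String × String)) :
    pvRank i ≤ 1 ↔ ((PySem.Str.lower ((PySem.Dict.mk i).getD "type" "") == "password") = true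
      ∨ (PySem.Str.lower ((PySem.Dict.mk i).getD "type" "") == "file") = true) := by
  unfold pvRank; split_ifs with h1 h2 h3 h4 <;> simp_all

lemma pv_rank_le_two (i : List (String × String)) :
    pvRank i ≤ 2 ↔ ((PySem.Str.lower ((PySem.Dict.mk i).getD "type" "") == "password") = true
      ∨ (PySem.Str.lower ((PySem.Dict.mk i).getD "type" "") == "file") = true
      ∨ (["search", "query", "q", "keyword", "s", "term"].contains
          (PySem.Str.lower ((PySem.Dict.mk i).getD "name" ""))) = true) := by
  unfold pvRank; split_ifs with h1 h2 h3 h4 <;> simp_all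

lemma pv_rank_le_three (i : List (String × String)) :
    pvRank i ≤ 3 ↔ ((PySem.Str.lower ((PySem.Dict.mk i).getD "type" "") == "password") = true
      ∨ (PySem.Str.lower ((PySem.Dict.mk i).getD "type" "") == "file") = true
      ∨ (["search", "query", "q", "keyword", "s", "term"].contains
          (PySem.Str.lower ((PySem.Dict.mk i).getD "name" ""))) = true
      ∨ (["username", "user", "email", "login", "passwd", "pass"].contains
          (PySem.Str.lower ((PySem.Dict.mk i).getD "name" ""))) = true) := by
  unfold pvRank; split_ifs with h1 h2 h3 h4 <;> simp_all

-- ===== VERDICT (by name: the statement is the Claim_ definition above) =====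
theorem classify_form_py_spec : Claim_equal_classify_form_py := by
  intro form _ _
  unfold Spec_classify_form_py classify_form_py classify_form_py_alt
  rw [pv_fold_eq_rank]
  set inputs := (PySem.Dict.mk form).getD "inputs" [] with hin
  set m := inputs.foldl (fun best i => Nat.min best (pvRank i)) 4 with hm
  have h4 : m ≤ 4 := by rw [hm, pv_foldl_min_le]; exact Or.inl (le_refl 4)
  simp only [pv_contains_ofList_map, pv_inter_ne_nil]
  split_ifs with c0 c1 c2 c3
  · -- password present: m = 0
    have h0 : m ≤ 0 := by
      rw [hm, pv_foldl_min_le]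
      rcases List.any_eq_true.mp c0 with ⟨i, hi, h⟩
      exact Or.inr ⟨i, hi, (pv_rank_le_zero i).mpr h⟩
    have : m = 0 := Nat.le_zero.mp h0
    simp [this]
  · -- file (no password): m = 1
    have h1 : m ≤ 1 := by
      rw [hm, pv_foldl_min_le]
      rcases List.any_eq_true.mp c1 with ⟨i, hi, h⟩
      exact Or.inr ⟨i, hi, (pv_rank_le_one i).mpr (Or.inr h)⟩
    have h0 : ¬ m ≤ 0 := by
      rw [hm, pv_foldl_min_le]
      rintro (h | ⟨i, hi, h⟩)
      · omega
      · exact c0 (List.any_eq_true.mpr ⟨i, hi, (pv_rank_le_zero i).mp h⟩)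
    have : m = 1 := by omega
    simp [this]
  · -- search name (no password/file): m = 2
    have h2 : m ≤ 2 := by
      rw [hm, pv_foldl_min_le]
      rcases List.any_eq_true.mp c2 with ⟨i, hi, h⟩
      exact Or.inr ⟨i, hi, (pv_rank_le_two i).mpr (Or.inr (Or.inr h))⟩
    have h1 : ¬ m ≤ 1 := by
      rw [hm, pv_foldl_min_le]
      rintro (h | ⟨i, hi, h⟩)
      · omega
      · rcases (pv_rank_le_one i).mp h with h | h
        · exact c0 (List.any_eq_true.mpr ⟨i, hi, h⟩)
        · exact c1 (List.any_eq_true.mpr ⟨i, hi, h⟩)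
    have : m = 2 := by omega
    simp [this]
  · -- login name only: m = 3
    have h3 : m ≤ 3 := by
      rw [hm, pv_foldl_min_le]
      rcases List.any_eq_true.mp c3 with ⟨i, hi, h⟩
      exact Or.inr ⟨i, hi, (pv_rank_le_three i).mpr (Or.inr (Or.inr (Or.inr h)))⟩
    have h2 : ¬ m ≤ 2 := by
      rw [hm, pv_foldl_min_le]
      rintro (h | ⟨i, hi, h⟩)
      · omega
      · rcases (pv_rank_le_two i).mp h with h | h | h
        · exact c0 (List.any_eq_true.mpr ⟨i, hi, h⟩)
        · exact c1 (List.any_eq_true.mpr ⟨i, hi, h⟩)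
        · exact c2 (List.any_eq_true.mpr ⟨i, hi, h⟩)
    have : m = 3 := by omega
    simp [this]
  · -- no indicator: m = 4
    have h3 : ¬ m ≤ 3 := by
      rw [hm, pv_foldl_min_le]
      rintro (h | ⟨i, hi, h⟩)
      · omega
      · rcases (pv_rank_le_three i).mp h with h | h | h | h
        · exact c0 (List.any_eq_true.mpr ⟨i, hi, h⟩)
        · exact c1 (List.any_eq_true.mpr ⟨i, hi, h⟩)
        · exact c2 (List.any_eq_true.mpr ⟨i, hi, h⟩)
        · exact c3 (List.any_eq_true.mpr ⟨i, hi, h⟩)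
    have : m = 4 := by omega
    simp [this]
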